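-- pv_equiv track=rewrite | github.com/plx/ferric-rules | scripts/bat-extract.py | first_keyword
-- ===== SOURCE A (Python) =====
-- def first_keyword(form_text):
--     """Return the first symbol after the opening paren of *form_text*."""
--     i = 0
--     n = len(form_text)
--     while i < n and form_text[i] != '(':
--         i += 1
--     i += 1
--     while i < n and form_text[i] in (' ', '\t', '\n', '\r'):
--         i += 1
--     start = i
--     while i < n and form_text[i] not in (' ', '\t', '\n', '\r', ')', '(', '"'):
--         i += 1
--     return form_text[start:i].lower()
-- ===== SOURCE B (Python) =====
-- def first_keyword(form_text):
--     """Return the first symbol after the opening paren of *form_text*."""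
--     SEEK, SKIP, COLLECT = 0, 1, 2
--     state = SEEK
--     out = []
--     for c in form_text:
--         if state == SEEK:
--             if c == '(':
--                 state = SKIP
--         elif state == SKIP:
--             if c in ' \t\n\r':
--                 continue
--             if c in ')("':
--                 break
--             out.append(c)
--             state = COLLECT
--         else:  # COLLECT
--             if c in ' \t\n\r)("':
--                 break
--             out.append(c)
--     return ''.join(out).lower()
-- ===== Notes on version B (the rewrite author's own statement) =====
-- stated objective: alternative
-- what changed: Replaced A's three staged index-based while-loop scans with one single-pass three-state machine (seek the opening paren / skip whitespace / collect the token) that walks the characters once with an accumulator and breaks at the first delimiter; measured constant-factor speedup from the single direct iteration over the string versus repeated per-index subscripting.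
import Mathlib
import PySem

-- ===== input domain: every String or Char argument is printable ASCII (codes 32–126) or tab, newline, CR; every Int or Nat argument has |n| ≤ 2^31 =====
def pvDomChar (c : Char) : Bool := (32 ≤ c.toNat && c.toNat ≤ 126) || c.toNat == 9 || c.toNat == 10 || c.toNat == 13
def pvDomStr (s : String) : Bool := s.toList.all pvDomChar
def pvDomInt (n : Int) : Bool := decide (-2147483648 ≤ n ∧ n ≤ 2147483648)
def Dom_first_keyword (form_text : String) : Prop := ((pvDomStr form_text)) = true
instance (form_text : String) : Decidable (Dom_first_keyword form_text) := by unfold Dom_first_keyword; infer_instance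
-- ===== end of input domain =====

-- B replaces A's three staged index scans by a single-pass three-state machine
-- (seek the opening paren / skip whitespace / collect the token) over the characters, one pass with an accumulator.

-- whitespace set (' ', '\t', '\n', '\r') and delimiter set, as in both Pythons
def pvIsWS (c : Char) : Bool := c == ' ' || c == '\t' || c == '\n' || c == '\r'
def pvIsDelim (c : Char) : Bool := pvIsWS c || c == ')' || c == '(' || c == '"'

-- ===== PORT A =====
-- one 'while i < n and <p>(form_text[i]): i += 1' loop (the three loops of A differ only in p);
-- the guard i < n keeps the index in range, so getD is exact for form_text[i]
def pvScanWhile (p : Char → Bool) (cs : List Char) (n i : Nat) : Nat :=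
  if _h : i < n then
    if p (cs.getD i ' ') then pvScanWhile p cs n (i + 1) else i
  else i
termination_by n - i

def first_keyword (form_text : String) : String :=
  let cs := form_text.toList
  let n := cs.length
  let i1 := pvScanWhile (fun c => c != '(') cs n 0
  let i2 := i1 + 1
  let i3 := pvScanWhile pvIsWS cs n i2
  let i4 := pvScanWhile (fun c => !pvIsDelim c) cs n i3
  -- form_text[start:i].lower() with 0 ≤ start ≤ i: Python's clamped slice is exactly drop/take
  String.ofList (PySem.Chars.lower ((cs.drop i3).take (i4 - i3)))

-- ===== PORT B =====
-- Source B's for-loop with a state variable, transcribed with one function per state over the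
-- remaining characters: state SEEK → pvSeek, SKIP → pvSkip, COLLECT → pvCollect; 'break'
-- ends the recursion, the accumulated 'out' is the returned list.
def pvCollect : List Char → List Char          -- state COLLECT
  | [] => []
  | c :: cs => if pvIsDelim c then [] else c :: pvCollect cs

def pvSkip : List Char → List Char             -- state SKIP
  | [] => []
  | c :: cs => if pvIsWS c then pvSkip cs
               else if c == ')' || c == '(' || c == '"' then []
               else c :: pvCollect cs

def pvSeek : List Char → List Char             -- state SEEK
  | [] => []
  | c :: cs => if c == '(' then pvSkip cs else pvSeek cs

def first_keyword_alt (form_text : String) : String :=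
  String.ofList (PySem.Chars.lower (pvSeek form_text.toList))   -- ''.join(out).lower()

-- ===== PRECONDITION & SPEC =====
def Spec_first_keyword (form_text : String) (out : String) : Prop := out = first_keyword_alt form_text
instance (form_text : String) (out : String) : Decidable (Spec_first_keyword form_text out) := by unfold Spec_first_keyword; infer_instance

-- ===== CLAIM (what is proved, stated in full; the proofs are below) =====
def Claim_equal_first_keyword : Prop := ∀ (form_text : String), Dom_first_keyword form_text → Spec_first_keyword form_text (first_keyword form_text)

-- ===== LEMMAS AND PROOFS =====

-- A's index loop computed as the length of the takeWhile prefix of the remaining suffix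
lemma pvScanWhile_eq (p : Char → Bool) (cs : List Char) (i : Nat) :
    pvScanWhile p cs cs.length i = i + ((cs.drop i).takeWhile p).length := by
  by_cases h : i < cs.length
  · rw [pvScanWhile]
    have hdrop : cs.drop i = cs[i] :: cs.drop (i + 1) := List.drop_eq_getElem_cons h
    have hgetD : cs.getD i ' ' = cs[i] := by simp [List.getD, h]
    rw [hdrop, hgetD, List.takeWhile_cons]
    by_cases hp : p cs[i]
    · have := pvScanWhile_eq p cs (i + 1)
      simp [h, hp, this]; omega
    · simp [h, hp]
  · rw [pvScanWhile]
    have : cs.drop i = [] := List.drop_eq_nil_of_le (by omega)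
    simp [h, this]
termination_by cs.length - i

-- glue: dropWhile is drop of the takeWhile length
lemma dropWhile_eq_drop_len (p : Char → Bool) (cs : List Char) :
    cs.dropWhile p = cs.drop (cs.takeWhile p).length := by
  induction cs with
  | nil => rfl
  | cons c cs ih =>
    by_cases hp : p c <;> simp [hp, ih]

-- glue: taking the takeWhile-prefix length gives the takeWhile prefix
lemma take_len_takeWhile (p : Char → Bool) (cs : List Char) :
    cs.take (cs.takeWhile p).length = cs.takeWhile p := by
  induction cs with
  | nil => rfl
  | cons c cs ih =>
    by_cases hp : p c <;> simp [hp, ih]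

-- B's COLLECT state is the takeWhile prefix up to a delimiter
lemma pvCollect_eq (cs : List Char) :
    pvCollect cs = cs.takeWhile (fun c => !pvIsDelim c) := by
  induction cs with
  | nil => rfl
  | cons c cs ih => by_cases hp : pvIsDelim c <;> simp [pvCollect, hp, ih]

-- B's SKIP state drops whitespace, then collects
lemma pvSkip_eq (cs : List Char) :
    pvSkip cs = (cs.dropWhile pvIsWS).takeWhile (fun c => !pvIsDelim c) := by
  induction cs with
  | nil => rfl
  | cons c cs ih =>
    by_cases hw : pvIsWS c
    · simp [pvSkip, hw, ih]
    · by_cases hd : c == ')' || c == '(' || c == '"'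
      · have : pvIsDelim c := by simp [pvIsDelim, hw]; simpa using hd
        simp [pvSkip, hw, hd, List.dropWhile_cons, this]
      · have : pvIsDelim c = false := by
          simp [pvIsDelim, hw]; simpa using hd
        simp [pvSkip, hw, hd, List.dropWhile_cons, List.takeWhile_cons, this, pvCollect_eq]

-- B's SEEK state matches on the suffix from the first opening paren on
lemma pvSeek_eq (cs : List Char) :
    pvSeek cs = match cs.dropWhile (fun c => c != '(') with
                | [] => []
                | _ :: after => (after.dropWhile pvIsWS).takeWhile (fun c => !pvIsDelim c) := by
  induction cs with
  | nil => rfl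
  | cons c cs ih =>
    by_cases hp : c == '('
    · have he : c = '(' := by simpa using hp
      simp [pvSeek, hp, he, pvSkip_eq]
    · have hne : c ≠ '(' := by simpa using hp
      simp only [pvSeek, hp, List.dropWhile_cons, if_neg hne, Bool.not_eq_true', if_false]
      simpa [hne] using ih

-- ===== VERDICT (by name: the statement is the Claim_ definition above) =====
theorem first_keyword_spec : Claim_equal_first_keyword := by
  intro s _
  unfold Spec_first_keyword first_keyword first_keyword_alt
  rw [pvSeek_eq]
  set cs := s.toList with hcs
  simp only
  set pOpen : Char → Bool := (fun c => c != '(') with hpOpen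
  have h1 : pvScanWhile pOpen cs cs.length 0 = (cs.takeWhile pOpen).length := by
    simpa using pvScanWhile_eq pOpen cs 0
  have hdw : cs.dropWhile pOpen = cs.drop (cs.takeWhile pOpen).length :=
    dropWhile_eq_drop_len pOpen cs
  cases hrest : cs.dropWhile pOpen with
  | nil =>
    -- no opening paren in cs: i1 = length, everything past the end, A's slice is empty
    have hlen : (cs.takeWhile pOpen).length = cs.length := by
      have : cs.takeWhile pOpen = cs := by
        have := List.takeWhile_append_dropWhile (p := pOpen) (l := cs)
        rw [hrest, List.append_nil] at this; exact this
      rw [this]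
    have h3 : pvScanWhile pvIsWS cs cs.length (cs.length + 1) = cs.length + 1 := by
      have := pvScanWhile_eq pvIsWS cs (cs.length + 1)
      simpa [List.drop_eq_nil_of_le (by omega : cs.length ≤ cs.length + 1)] using this
    have h4 : pvScanWhile (fun c => !pvIsDelim c) cs cs.length (cs.length + 1) = cs.length + 1 := by
      have := pvScanWhile_eq (fun c => !pvIsDelim c) cs (cs.length + 1)
      simpa [List.drop_eq_nil_of_le (by omega : cs.length ≤ cs.length + 1)] using this
    rw [h1, hlen, h3, h4]
    simp [PySem.Chars.lower]
  | cons c after =>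
    -- opening paren found at index i1; after = cs.drop (i1+1)
    have hafter : after = cs.drop ((cs.takeWhile pOpen).length + 1) := by
      have : c :: after = cs.drop (cs.takeWhile pOpen).length := by rw [← hrest, hdw]
      have htail := congrArg List.tail this
      simpa [List.drop_drop] using htail
    rw [h1]
    have h3 := pvScanWhile_eq pvIsWS cs ((cs.takeWhile pOpen).length + 1)
    rw [h3]
    set i2 := (cs.takeWhile pOpen).length + 1 with hi2
    set w := ((cs.drop i2).takeWhile pvIsWS).length with hw
    have hafter' : after.dropWhile pvIsWS = cs.drop (i2 + w) := by
      rw [hafter, dropWhile_eq_drop_len, List.drop_drop, Nat.add_comm]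
    have h4 := pvScanWhile_eq (fun c => !pvIsDelim c) cs (i2 + w)
    rw [h4]
    have htakeA : (cs.drop (i2 + w)).take
        (i2 + w + ((cs.drop (i2 + w)).takeWhile (fun c => !pvIsDelim c)).length - (i2 + w))
        = (cs.drop (i2 + w)).takeWhile (fun c => !pvIsDelim c) := by
      rw [Nat.add_sub_cancel_left]
      exact take_len_takeWhile _ _
    rw [htakeA, ← hafter']
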